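-- pv_equiv track=rewrite | github.com/taxmanyana/cft | cft.py | get_parameter
-- ===== SOURCE A (Python) =====
-- def get_parameter(list):
--     keys = []
--     for key in list:
--         keys.append(key)
--     ref_keys = ['Y', 'X', 'T','zlev']
--     for x in reversed(range(len(keys))):
--         if keys[x] not in ref_keys:
--             return keys[x]
--     return None
-- ===== SOURCE B (Python) =====
-- def get_parameter(list):
--     ref_keys = ('Y', 'X', 'T', 'zlev')
--     result = None
--     for key in list:
--         if key not in ref_keys:
--             result = key
--     return result
-- ===== Notes on version B (the rewrite author's own statement) =====
-- stated objective: simpler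
-- what changed: Replaced the copy loop plus reverse index scan with early return by a single forward pass that overwrites an accumulator with each non-reference key, returning it at the end.
import Mathlib
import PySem

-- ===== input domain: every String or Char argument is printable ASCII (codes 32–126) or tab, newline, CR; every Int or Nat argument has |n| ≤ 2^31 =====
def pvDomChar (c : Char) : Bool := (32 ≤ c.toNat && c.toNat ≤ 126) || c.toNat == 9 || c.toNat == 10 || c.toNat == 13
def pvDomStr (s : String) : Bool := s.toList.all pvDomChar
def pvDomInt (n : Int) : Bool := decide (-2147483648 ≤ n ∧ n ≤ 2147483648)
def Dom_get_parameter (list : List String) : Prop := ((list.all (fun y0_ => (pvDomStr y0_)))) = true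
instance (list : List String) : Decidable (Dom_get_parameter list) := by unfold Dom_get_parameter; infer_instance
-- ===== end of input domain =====

-- B replaces A's copy loop and reverse indexed scan by one forward pass keeping the last non-reference key; simpler, same result.
-- ===== PORT A =====
def pvRefKeys : List String := ["Y", "X", "T", "zlev"]

-- reverse index loop 'for x in reversed(range(len(keys)))' of A
def pvScanA (keys : List String) : Nat → Option String
  | 0 => none
  | n + 1 =>
    match PySem.List.pyGet? keys (n : Int) with
    | some k => if pvRefKeys.contains k then pvScanA keys n else some k
    | none => none

def get_parameter (list : List String) : Option String :=
  let keys := list.foldl (fun acc key => acc ++ [key]) []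
  pvScanA keys keys.length

-- ===== PORT B =====
def get_parameter_alt (list : List String) : Option String :=
  list.foldl (fun result key => if pvRefKeys.contains key then result else some key) none

-- ===== PRECONDITION & SPEC =====
def Spec_get_parameter (list : List String) (out : Option String) : Prop := out = get_parameter_alt list
instance (list : List String) (out : Option String) : Decidable (Spec_get_parameter list out) := by unfold Spec_get_parameter; infer_instance

-- ===== CLAIM (what is proved, stated in full; the proofs are below) =====
def Claim_equal_get_parameter : Prop := ∀ (list : List String), Dom_get_parameter list → Spec_get_parameter list (get_parameter list)

-- ===== LEMMAS AND PROOFS =====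

-- ===== VERDICT (by name: the statement is the Claim_ definition above) =====
theorem pv_copy_eq (l : List String) (acc : List String) :
    l.foldl (fun acc key => acc ++ [key]) acc = acc ++ l := by
  induction l generalizing acc with
  | nil => simp
  | cons a t ih => simp [List.foldl, ih]

theorem pvScanA_append (l : List String) (a : String) (n : Nat) (hn : n ≤ l.length) :
    pvScanA (l ++ [a]) n = pvScanA l n := by
  induction n with
  | zero => rfl
  | succ m ih =>
    have hm : m < l.length := by omega
    simp [pvScanA, PySem.List.pyGet?_natCast, List.getElem?_append_left hm, ih (by omega)]

theorem pv_main (l : List String) :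
    pvScanA l l.length = l.foldl (fun result key => if pvRefKeys.contains key then result else some key) none := by
  induction l using List.reverseRecOn with
  | nil => rfl
  | append_singleton t a ih =>
    have hlen : (t ++ [a]).length = t.length + 1 := by simp
    rw [hlen]
    simp only [pvScanA, PySem.List.pyGet?_natCast]
    rw [List.getElem?_append_right (by omega)]
    simp only [List.foldl_append, List.foldl]
    rw [pvScanA_append t a t.length (le_refl _), ih]
    simp

theorem get_parameter_spec : Claim_equal_get_parameter := by
  intro list _
  unfold Spec_get_parameter get_parameter get_parameter_alt
  simp only [pv_copy_eq, List.nil_append]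
  exact pv_main list
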